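-- pv_equiv track=rewrite | github.com/QuinVIVER/ShellFusion- | ShellFusion++/online/category_analyzer.py | checkIfCategory
-- ===== SOURCE A (Python) =====
-- def checkIfCategory(verb_list,cate):
--     '''
--     return category based on verb_list and category_list.
--     '''
--     res = [0] * len(verb_list)
--     for category in cate:
--         matched = set(verb_list) & set(category.split('/'))
--         if len(matched) != 0:
--             for m in list(matched):
--                 res[verb_list.index(m)] = ([m],category)
--     res = [r for r in res if r != 0]
--     if len(res) != 0:
--         iscate = True
--         if len(res) != 1 and res[0][0][0] == 'do':
--             # prevent choosing "do" or "be" in the first place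
--             verb = res[1][0][0]
--             category = res[1][1]
--         elif len(res) == 1 and len(res[0]) != 1 and res[0][0][0] == 'do':
--
--             try:
--                 verb = res[0][0][1]
--             except IndexError:
--                 verb = res[0][0][0]
--             category = res[0][1]
--         else: verb,category = res[0][0][0],res[0][1]
--     else: iscate,verb,category = False,None,None
--     return iscate,verb,category
-- ===== SOURCE B (Python) =====
-- def checkIfCategory(verb_list, cate):
--     '''
--     return category based on verb_list and category_list.
--     '''
--     # one pass over cate: token -> its last category (last wins, as in A's overwrites)
--     verb_to_cat = {}
--     for category in cate:
--         for tok in category.split('/'):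
--             verb_to_cat[tok] = category
--     # one pass over verb_list in order, first occurrences only
--     res = []
--     seen = set()
--     for v in verb_list:
--         if v in verb_to_cat and v not in seen:
--             seen.add(v)
--             res.append((v, verb_to_cat[v]))
--     if not res:
--         return False, None, None
--     if len(res) > 1 and res[0][0] == 'do':
--         return True, res[1][0], res[1][1]
--     return True, res[0][0], res[0][1]
-- ===== Notes on version B (the rewrite author's own statement) =====
-- stated objective: faster
-- what changed: Replaces the per-category set-intersection plus pre-sized zero array with repeated verb_list.index scans by a single token->category dict built in one pass over cate and one verb-ordered pass with a seen-set; the quirky 'do' selection collapses to one branch since entries are always ('v', cat) pairs.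
import Mathlib
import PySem

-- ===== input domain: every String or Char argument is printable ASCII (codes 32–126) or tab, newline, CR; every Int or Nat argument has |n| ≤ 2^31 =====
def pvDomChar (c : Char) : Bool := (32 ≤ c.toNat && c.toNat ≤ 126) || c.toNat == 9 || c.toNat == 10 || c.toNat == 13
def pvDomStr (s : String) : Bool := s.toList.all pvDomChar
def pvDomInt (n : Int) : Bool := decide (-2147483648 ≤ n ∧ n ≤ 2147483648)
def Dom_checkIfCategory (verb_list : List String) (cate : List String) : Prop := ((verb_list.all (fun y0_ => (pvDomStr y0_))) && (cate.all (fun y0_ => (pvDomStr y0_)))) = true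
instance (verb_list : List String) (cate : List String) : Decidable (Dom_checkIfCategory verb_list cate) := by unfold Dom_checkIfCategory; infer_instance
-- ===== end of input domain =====

-- B replaces A's per-category set intersection + index() scans by one token->category dict and one verb-ordered pass (faster; return value only).

-- ===== PORT A =====
-- category.split('/'): sep is the non-empty "/", so split? always returns some (exact)
def aSplitSlash (s : String) : List String := (PySem.Str.split? s "/").getD []

-- one category step: matched = set(verb_list) & set(category.split('/')); for m in matched: res[verb_list.index(m)] = ([m],category)
-- (CPython iterates `matched` in hash order; each m writes its own distinct slot, so the resulting res does not depend on
--  that order and folding over the Set in its insertion order is exact.)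
def aStep (verb_list : List String) (res : List (Option (List String × String))) (category : String) :
    List (Option (List String × String)) :=
  if (PySem.Set.inter (PySem.Set.ofList verb_list) (PySem.Set.ofList (aSplitSlash category))).length ≠ 0 then
    (PySem.Set.inter (PySem.Set.ofList verb_list) (PySem.Set.ofList (aSplitSlash category))).foldl
      (fun res m =>
        match PySem.List.index? verb_list m with
        | some i => res.set i (some ([m], category))
        | none => res) res   -- index() cannot fail here: m ∈ verb_list
  else res

def checkIfCategory (verb_list : List String) (cate : List String) : Bool × Option String × Option String :=
  let res0 : List (Option (List String × String)) := List.replicate verb_list.length none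
  let res1 := cate.foldl (aStep verb_list) res0
  let res : List (List String × String) := res1.filterMap id   -- [r for r in res if r != 0]
  match res with
  | [] => (false, none, none)                                  -- len(res) == 0: iscate,verb,category = False,None,None
  | r0 :: rest =>                                              -- len(res) != 0: iscate = True
    if rest.length + 1 ≠ 1 ∧ r0.1.headD "" = "do" then         -- res[0][0][0] == 'do' (res[0][0] is the non-empty [m])
      match rest with
      | r1 :: _ => (true, some (r1.1.headD ""), some r1.2)     -- verb, category = res[1][0][0], res[1][1]
      | [] => (true, none, none)                               -- unreachable: len(res) != 1
    else if rest.length + 1 = 1 ∧ 2 ≠ 1 ∧ r0.1.headD "" = "do" then  -- len(res[0]) != 1 is 2 != 1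
      -- try: verb = res[0][0][1] except IndexError: verb = res[0][0][0]
      (true, some (match PySem.List.pyGet? r0.1 1 with
                   | some v => v
                   | none => r0.1.headD ""), some r0.2)
    else (true, some (r0.1.headD ""), some r0.2)               -- verb, category = res[0][0][0], res[0][1]

-- ===== PORT B =====
-- category.split('/') (B's own copy of the split helper)
def bSplitSlash (s : String) : List String := (PySem.Str.split? s "/").getD []

-- verb_to_cat: token -> its last category (dict overwrite = last category wins)
def bDict (cate : List String) : PySem.Dict String String :=
  cate.foldl (fun d category =>
    (bSplitSlash category).foldl (fun d tok => d.insert tok category) d) PySem.Dict.empty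

-- one verb-ordered pass with a seen-set: first occurrence of each v that is a dict key
def bStep (d : PySem.Dict String String)
    (st : List (String × String) × PySem.Set String) (v : String) :
    List (String × String) × PySem.Set String :=
  match d.get? v with
  | some c => if PySem.Set.contains st.2 v then st else (st.1 ++ [(v, c)], PySem.Set.add st.2 v)
  | none => st

def checkIfCategory_alt (verb_list : List String) (cate : List String) : Bool × Option String × Option String :=
  let d := bDict cate
  let res := (verb_list.foldl (bStep d) ([], PySem.Set.empty)).1
  match res with
  | [] => (false, none, none)
  | (v0, c0) :: rest =>
    if rest.length + 1 > 1 ∧ v0 = "do" then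
      match rest with
      | (v1, c1) :: _ => (true, some v1, some c1)
      | [] => (true, some v0, some c0)  -- unreachable
    else (true, some v0, some c0)

-- ===== PRECONDITION & SPEC =====
def Spec_checkIfCategory (verb_list : List String) (cate : List String) (out : Bool × Option String × Option String) : Prop := out = checkIfCategory_alt verb_list cate
instance (verb_list : List String) (cate : List String) (out : Bool × Option String × Option String) : Decidable (Spec_checkIfCategory verb_list cate out) := by unfold Spec_checkIfCategory; infer_instance

-- ===== CLAIM (what is proved, stated in full; the proofs are below) =====
def Claim_equal_checkIfCategory : Prop := ∀ (verb_list : List String) (cate : List String), Dom_checkIfCategory verb_list cate → Spec_checkIfCategory verb_list cate (checkIfCategory verb_list cate)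

-- ===== LEMMAS AND PROOFS =====

-- ---- dict characterisation: bDict lookup = last category whose tokens contain v ----
theorem tokfold_get (ts : List String) (c : String) (d : PySem.Dict String String) (v : String) :
    ((ts.foldl (fun d tok => d.insert tok c) d).get? v) = if v ∈ ts then some c else d.get? v := by
  induction ts generalizing d with
  | nil => simp
  | cons t ts ih =>
    simp only [List.foldl_cons, ih, PySem.Dict.get?_insert, List.mem_cons]
    by_cases h1 : v ∈ ts <;> by_cases h2 : v = t <;> simp [h1, h2]

theorem bDict_get_aux (cs : List String) (d : PySem.Dict String String) (v : String) :
    ((cs.foldl (fun d category => (bSplitSlash category).foldl (fun d tok => d.insert tok category) d) d).get? v)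
      = (cs.reverse.find? (fun c => decide (v ∈ bSplitSlash c))).or (d.get? v) := by
  induction cs generalizing d with
  | nil => simp
  | cons c cs ih =>
    rw [List.foldl_cons, ih, tokfold_get, List.reverse_cons, List.find?_append]
    cases hf : cs.reverse.find? (fun c => decide (v ∈ bSplitSlash c)) with
    | some x => simp [Option.or]
    | none =>
      by_cases h : v ∈ bSplitSlash c <;> simp [List.find?, h]

theorem bDict_get (cate : List String) (v : String) :
    (bDict cate).get? v = cate.reverse.find? (fun c => decide (v ∈ bSplitSlash c)) := by
  have := bDict_get_aux cate PySem.Dict.empty v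
  rw [bDict, this]
  cases cate.reverse.find? (fun c => decide (v ∈ bSplitSlash c)) <;> simp [Option.or]

-- ---- first-occurrence characterisation of index? ----
theorem index?_first_iff (vl : List String) (i : Nat) (hi : i < vl.length) :
    PySem.List.index? vl vl[i] = some i ↔ vl[i] ∉ vl.take i := by
  rw [PySem.List.index?_eq_some_iff]
  constructor
  · rintro ⟨pre, suf, hdec, hlen, hnot⟩
    have hpre : vl.take i = pre := by
      subst hlen
      rw [hdec, List.take_left]
    rwa [hpre]
  · intro hnot
    refine ⟨vl.take i, vl.drop (i+1), ?_, ?_, hnot⟩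
    · rw [List.getElem_cons_drop hi, List.take_append_drop]
    · simp [List.length_take]
      omega

-- ---- A's inner set loop, pointwise ----
theorem setFold_getElem (vl : List String) (c : String) (ms : List String)
    (res : List (Option (List String × String))) (hlen : res.length = vl.length)
    (i : Nat) (hi : i < vl.length) :
    ((ms.foldl (fun res m =>
        match PySem.List.index? vl m with
        | some j => res.set j (some ([m], c))
        | none => res) res)[i]?)
      = if PySem.List.index? vl vl[i] = some i ∧ vl[i] ∈ ms
        then some (some ([vl[i]], c)) else res[i]? := by
  induction ms generalizing res with
  | nil => simp
  | cons m ms ih =>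
    cases h : PySem.List.index? vl m with
    | none =>
      simp only [List.foldl_cons, h]
      rw [ih res hlen]
      by_cases h1 : PySem.List.index? vl vl[i] = some i
      · by_cases hm : vl[i] = m
        · rw [hm] at h1; rw [h1] at h; cases h
        · refine if_congr ?_ rfl rfl
          constructor
          · rintro ⟨a, b⟩; exact ⟨a, List.mem_cons_of_mem _ b⟩
          · rintro ⟨a, b⟩
            rcases List.mem_cons.mp b with hb | hb
            · exact absurd hb hm
            · exact ⟨a, hb⟩
      · rw [if_neg (by rintro ⟨a, _⟩; exact h1 a), if_neg (by rintro ⟨a, _⟩; exact h1 a)]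
    | some j =>
      simp only [List.foldl_cons, h]
      rw [ih _ (by rw [List.length_set]; exact hlen)]
      by_cases hcond : PySem.List.index? vl vl[i] = some i ∧ vl[i] ∈ ms
      · rw [if_pos hcond, if_pos ⟨hcond.1, List.mem_cons_of_mem _ hcond.2⟩]
      · rw [if_neg hcond, List.getElem?_set]
        by_cases hji : j = i
        · subst hji
          obtain ⟨hk, hv, _⟩ := PySem.List.getElem_of_index?_eq_some h
          rw [if_pos rfl, if_pos (show j < res.length by rw [hlen]; exact hi)]
          rw [if_pos ⟨by rw [hv]; exact h, by rw [hv]; exact List.mem_cons_self⟩, hv]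
        · rw [if_neg hji]
          have hcond' : ¬(PySem.List.index? vl vl[i] = some i ∧ vl[i] ∈ m :: ms) := by
            rintro ⟨h1, h2⟩
            rcases List.mem_cons.mp h2 with hm | hms
            · rw [hm] at h1
              exact hji (Option.some.inj (h1.symm.trans h)).symm
            · exact hcond ⟨h1, hms⟩
          rw [if_neg hcond']

theorem setFold_length (vl : List String) (c : String) (ms : List String)
    (res : List (Option (List String × String))) :
    (ms.foldl (fun res m =>
        match PySem.List.index? vl m with
        | some j => res.set j (some ([m], c))
        | none => res) res).length = res.length := by
  induction ms generalizing res with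
  | nil => rfl
  | cons m ms ih =>
    cases h : PySem.List.index? vl m with
    | none => simp only [List.foldl_cons, h]; exact ih res
    | some j => simp only [List.foldl_cons, h]; rw [ih]; exact List.length_set ..

-- ---- A's one-category step, pointwise ----
theorem aStep_length (vl : List String) (res : List (Option (List String × String))) (c : String) :
    (aStep vl res c).length = res.length := by
  unfold aStep
  split
  · exact setFold_length _ _ _ _
  · rfl

theorem aStep_getElem (vl : List String) (res : List (Option (List String × String)))
    (c : String) (hlen : res.length = vl.length) (i : Nat) (hi : i < vl.length) :
    (aStep vl res c)[i]?
      = if PySem.List.index? vl vl[i] = some i ∧ vl[i] ∈ aSplitSlash c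
        then some (some ([vl[i]], c)) else res[i]? := by
  have hmem : vl[i] ∈ PySem.Set.inter (PySem.Set.ofList vl) (PySem.Set.ofList (aSplitSlash c))
      ↔ vl[i] ∈ aSplitSlash c := by
    rw [PySem.Set.mem_inter]
    simp [PySem.Set.mem_ofList, List.getElem_mem]
  unfold aStep
  split
  · rw [setFold_getElem vl c _ res hlen i hi]
    by_cases h1 : PySem.List.index? vl vl[i] = some i <;> simp [hmem]
  · rename_i hz
    have hempty : PySem.Set.inter (PySem.Set.ofList vl) (PySem.Set.ofList (aSplitSlash c)) = [] := by
      have := not_not.mp hz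
      exact List.length_eq_zero_iff.mp this
    rw [if_neg]
    rintro ⟨h1, h2⟩
    have : vl[i] ∈ PySem.Set.inter (PySem.Set.ofList vl) (PySem.Set.ofList (aSplitSlash c)) := hmem.mpr h2
    rw [hempty] at this
    cases this

-- ---- A's fold over categories, pointwise ----
theorem aFold_length (vl : List String) (cs : List String) (res : List (Option (List String × String))) :
    (cs.foldl (aStep vl) res).length = res.length := by
  induction cs generalizing res with
  | nil => rfl
  | cons c cs ih => rw [List.foldl_cons, ih, aStep_length]

theorem aFold_getElem (vl : List String) (cs : List String)
    (res : List (Option (List String × String))) (f : String → Option String)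
    (hlen : res.length = vl.length)
    (hres : ∀ i (hi : i < vl.length), res[i]?
      = some (if PySem.List.index? vl vl[i] = some i
              then (f vl[i]).map (fun c => ([vl[i]], c)) else none))
    (i : Nat) (hi : i < vl.length) :
    (cs.foldl (aStep vl) res)[i]?
      = some (if PySem.List.index? vl vl[i] = some i
              then (((cs.reverse.find? (fun c => decide (vl[i] ∈ aSplitSlash c))).or (f vl[i])).map
                      (fun c => ([vl[i]], c)) : Option (List String × String))
              else none) := by
  induction cs generalizing res f with
  | nil =>
    rw [List.foldl_nil, hres i hi]
    cases hf : f vl[i] <;> simp [Option.or]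
  | cons c cs ih =>
    rw [List.foldl_cons]
    have step := ih (aStep vl res c) (fun v => if v ∈ aSplitSlash c then some c else f v)
      (by rw [aStep_length]; exact hlen)
      (by
        intro j hj
        rw [aStep_getElem vl res c hlen j hj]
        by_cases h1 : PySem.List.index? vl vl[j] = some j
        · by_cases h2 : vl[j] ∈ aSplitSlash c
          · rw [if_pos ⟨h1, h2⟩]
            have h1' := h1; rw [PySem.List.index?_eq_idxOf?] at h1'
            simp [h1', h2]
          · rw [if_neg (by rintro ⟨_, hx⟩; exact h2 hx), hres j hj]; simp [h2]
        · rw [if_neg (by rintro ⟨hx, _⟩; exact h1 hx), hres j hj]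
          have h1' := h1; rw [PySem.List.index?_eq_idxOf?] at h1'
          simp [h1'])
    rw [step]
    by_cases h1 : PySem.List.index? vl vl[i] = some i
    · rw [if_pos h1, if_pos h1]
      congr 1
      rw [List.reverse_cons, List.find?_append]
      cases hf : cs.reverse.find? (fun c => decide (vl[i] ∈ aSplitSlash c)) with
      | some x => simp [Option.or]
      | none =>
        by_cases h2 : vl[i] ∈ aSplitSlash c <;> simp [List.find?, h2, Option.or]
    · rw [if_neg h1, if_neg h1]

-- ---- recursive characterisations shared by both sides ----
def ochain (d : PySem.Dict String String) : List String → List String → List (Option (List String × String))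
  | _, [] => []
  | pre, v :: rest =>
    (if v ∈ pre then none else (d.get? v).map (fun c => ([v], c))) :: ochain d (pre ++ [v]) rest

def chain (d : PySem.Dict String String) : List String → List String → List (String × String)
  | _, [] => []
  | pre, v :: rest =>
    (if v ∈ pre then [] else
      match d.get? v with
      | some c => [(v, c)]
      | none => []) ++ chain d (pre ++ [v]) rest

theorem ochain_length (d : PySem.Dict String String) (rest pre : List String) :
    (ochain d pre rest).length = rest.length := by
  induction rest generalizing pre with
  | nil => rfl
  | cons v rest ih => simp [ochain, ih]

theorem ochain_getElem (d : PySem.Dict String String) (rest pre : List String)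
    (i : Nat) (hi : i < rest.length) :
    (ochain d pre rest)[i]?
      = some (if rest[i] ∈ pre ++ rest.take i then none
              else (d.get? rest[i]).map (fun c => ([rest[i]], c))) := by
  induction rest generalizing pre i with
  | nil => cases hi
  | cons v rest ih =>
    cases i with
    | zero => simp [ochain]
    | succ i =>
      have hi' : i < rest.length := Nat.lt_of_succ_lt_succ hi
      show (_ :: ochain d (pre ++ [v]) rest)[i+1]? = _
      rw [List.getElem?_cons_succ, ih (pre ++ [v]) i hi']
      simp [List.append_assoc]

theorem filterMap_ochain (d : PySem.Dict String String) (rest pre : List String) :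
    (ochain d pre rest).filterMap id = (chain d pre rest).map (fun p => ([p.1], p.2)) := by
  induction rest generalizing pre with
  | nil => rfl
  | cons v rest ih =>
    by_cases h : v ∈ pre
    · simp only [ochain, chain, if_pos h, List.filterMap_cons, List.map_append]
      simpa using ih (pre ++ [v])
    · cases hd : d.get? v with
      | none =>
        simp only [ochain, chain, if_neg h, hd, List.filterMap_cons, List.map_append]
        simpa using ih (pre ++ [v])
      | some c =>
        have hih := ih (pre ++ [v])
        simp only [ochain, chain, if_neg h, hd]
        simp only [Option.map_some, List.filterMap_cons, id_eq]
        exact congrArg _ hih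

-- ---- B's fold = chain ----
theorem bFold_chain (d : PySem.Dict String String) (rest : List String)
    (pre : List String) (acc : List (String × String)) (seen : PySem.Set String)
    (hseen : ∀ v, v ∈ seen ↔ v ∈ pre ∧ (d.get? v).isSome) :
    (rest.foldl (bStep d) (acc, seen)).1 = acc ++ chain d pre rest := by
  induction rest generalizing pre acc seen with
  | nil => simp [chain]
  | cons v rest ih =>
    rw [List.foldl_cons]
    cases hd : d.get? v with
    | none =>
      rw [show bStep d (acc, seen) v = (acc, seen) from by simp [bStep, hd]]
      rw [ih (pre ++ [v]) acc seen (by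
        intro w
        rw [hseen w, List.mem_append, List.mem_singleton]
        constructor
        · rintro ⟨h1, h2⟩; exact ⟨Or.inl h1, h2⟩
        · rintro ⟨h1 | h1, h2⟩
          · exact ⟨h1, h2⟩
          · subst h1; rw [hd] at h2; cases h2)]
      have : chain d pre (v :: rest) = chain d (pre ++ [v]) rest := by
        rw [chain]
        by_cases h : v ∈ pre <;> simp [h, hd]
      rw [this]
    | some c =>
      by_cases hv : v ∈ seen
      · have hvpre : v ∈ pre := ((hseen v).mp hv).1
        rw [show bStep d (acc, seen) v = (acc, seen) from by
          simp [bStep, hd, hv]]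
        rw [ih (pre ++ [v]) acc seen (by
          intro w
          rw [hseen w, List.mem_append, List.mem_singleton]
          constructor
          · rintro ⟨h1, h2⟩; exact ⟨Or.inl h1, h2⟩
          · rintro ⟨h1 | h1, h2⟩
            · exact ⟨h1, h2⟩
            · subst h1; exact ⟨hvpre, h2⟩)]
        have : chain d pre (v :: rest) = chain d (pre ++ [v]) rest := by
          rw [chain, if_pos hvpre]; rfl
        rw [this]
      · have hvpre : v ∉ pre := fun hp => hv ((hseen v).mpr ⟨hp, by rw [hd]; rfl⟩)
        rw [show bStep d (acc, seen) v = (acc ++ [(v, c)], PySem.Set.add seen v) from by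
          simp [bStep, hd, hv]]
        rw [ih (pre ++ [v]) (acc ++ [(v, c)]) (PySem.Set.add seen v) (by
          intro w
          rw [PySem.Set.mem_add, hseen w, List.mem_append, List.mem_singleton]
          constructor
          · rintro (⟨h1, h2⟩ | h1)
            · exact ⟨Or.inl h1, h2⟩
            · subst h1; exact ⟨Or.inr rfl, by rw [hd]; rfl⟩
          · rintro ⟨h1 | h1, h2⟩
            · exact Or.inl ⟨h1, h2⟩
            · exact Or.inr h1)]
        have : chain d pre (v :: rest) = (v, c) :: chain d (pre ++ [v]) rest := by
          rw [chain, if_neg hvpre, hd]; rfl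
        rw [this]
        simp

-- ---- the bridge: A's filtered array = the chain of B's dict ----
theorem aRes_eq_ochain (vl cate : List String) :
    cate.foldl (aStep vl) (List.replicate vl.length none) = ochain (bDict cate) [] vl := by
  apply List.ext_getElem?
  intro i
  by_cases hi : i < vl.length
  · rw [aFold_getElem vl cate (List.replicate vl.length none) (fun _ => none) (by simp)
      (by intro j hj; simp [hj]) i hi]
    rw [ochain_getElem (bDict cate) vl [] i hi, bDict_get]
    simp only [List.nil_append]
    by_cases h1 : vl[i] ∈ vl.take i
    · have hni : ¬ (PySem.List.index? vl vl[i] = some i) := by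
        rw [index?_first_iff vl i hi]; simpa using h1
      rw [if_neg hni, if_pos h1]
    · have hyi : PySem.List.index? vl vl[i] = some i := (index?_first_iff vl i hi).mpr h1
      rw [if_pos hyi, if_neg h1]
      congr 1
      have hor : (List.find? (fun c => decide (vl[i] ∈ aSplitSlash c)) cate.reverse).or none
          = List.find? (fun c => decide (vl[i] ∈ aSplitSlash c)) cate.reverse := by
        cases List.find? (fun c => decide (vl[i] ∈ aSplitSlash c)) cate.reverse <;> rfl
      rw [hor]
      rfl
  · rw [List.getElem?_eq_none, List.getElem?_eq_none]
    · rw [ochain_length]; omega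
    · rw [aFold_length, List.length_replicate]; omega

-- ===== VERDICT (by name: the statement is the Claim_ definition above) =====
theorem checkIfCategory_spec : Claim_equal_checkIfCategory := by
  intro vl cate _
  show checkIfCategory vl cate = checkIfCategory_alt vl cate
  simp only [checkIfCategory, checkIfCategory_alt]
  rw [aRes_eq_ochain, filterMap_ochain,
    bFold_chain (bDict cate) vl [] [] PySem.Set.empty (by intro v; simp [PySem.Set.empty])]
  simp only [List.nil_append]
  cases hc : chain (bDict cate) [] vl with
  | nil => rfl
  | cons p rest =>
    obtain ⟨v0, c0⟩ := p
    cases rest with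
    | nil => simp [PySem.List.pyGet?, PySem.List.pyIdx?]
    | cons q rest' =>
      obtain ⟨v1, c1⟩ := q
      by_cases hdo : v0 = "do" <;> simp [hdo]
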